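-- pv_equiv track=rewrite | github.com/lcrvl2/outbound-workflows | hiring-intel/scripts/generate_emails.py | select_case_studies
-- ===== SOURCE A (Python) =====
-- CASE_STUDIES = {
--     'adtrak_scaling': (
--         'Adtrak (UK agency, 51-200 employees): switched from Hootsuite, doubled social team '
--         'from 3 to 7, now managing 100+ profiles for 400+ SME clients. '
--         'Streamlined onboarding for new social media managers.'
--     ),
--     'homefield_ecommerce': (
--         'Homefield Apparel (US e-commerce, 2-10 employees, college sports apparel): '
--         'was tracking social media conversions manually with Excel spreadsheets. '
--         'Switched to Agorapulse for automated social media ROI reporting. '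
--         'Replaced manual spreadsheet tracking, now proves ROI of organic social media efforts with data. '
--         'Quote: "Now I have more time to do my creative stuff and think about what\'s next, '
--         'instead of being like, Oh man, I haven\'t done my reporting for the week."'
--     ),
--     'nexford_time': (
--         'Nexford University (US, 51-200 employees, higher education, 8-person social team): '
--         'switched from Hootsuite after it failed to capture all messages. '
--         'Reduced social media reporting time by 75% with Agorapulse. '
--         'Was using Excel spreadsheets for manual reporting that took hours. '
--         'Quote: "Agorapulse essentially quarters the amount of time that I need to get those reports."'
--     ),
--     'digital_butter_roi': (
--         'Digital Butter (South Africa agency, 2-10 employees): '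
--         'switched from Buffer after outgrowing its reporting capabilities. '
--         'Clients increased sales by 300%. Grew one client\'s audience by 700% in one year. '
--         'Cut reporting time in half. Uses label reports to analyze which content types drive more sales. '
--         'Quote: "We don\'t just post for the sake of posting. There needs to be a strategy, '
--         'and we need to be able to show a client a detailed report on how content has done."'
--     ),
-- }
--
-- def select_case_studies(industry):
--     """Select relevant case studies based on company industry"""
--     industry_lower = (industry or '').lower()
--
--     # Agency verticals — Adtrak (scaling) + Digital Butter (ROI)
--     if any(kw in industry_lower for kw in ['agency', 'marketing & advertising',
--                                             'advertising', 'media', 'pr ',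
--                                             'public relations', 'communications']):
--         return '\n'.join([
--             f'- {CASE_STUDIES["adtrak_scaling"]}',
--             f'- {CASE_STUDIES["digital_butter_roi"]}',
--         ])
--
--     # E-commerce / Retail — Homefield Apparel is closest match
--     if any(kw in industry_lower for kw in ['ecommerce', 'e-commerce', 'retail',
--                                             'consumer goods', 'food', 'beverage',
--                                             'fashion', 'apparel']):
--         return '\n'.join([
--             f'- {CASE_STUDIES["homefield_ecommerce"]}',
--             f'- {CASE_STUDIES["digital_butter_roi"]}',
--         ])
--
--     # Education — Nexford University is closest match
--     if any(kw in industry_lower for kw in ['education', 'university', 'school',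
--                                             'higher ed', 'academic']):
--         return '\n'.join([
--             f'- {CASE_STUDIES["nexford_time"]}',
--             f'- {CASE_STUDIES["homefield_ecommerce"]}',
--         ])
--
--     # B2B SaaS / Tech — Nexford (time savings) + Digital Butter (ROI proof)
--     if any(kw in industry_lower for kw in ['saas', 'software', 'technology',
--                                             'information technology', 'computer',
--                                             'internet', 'fintech']):
--         return '\n'.join([
--             f'- {CASE_STUDIES["nexford_time"]}',
--             f'- {CASE_STUDIES["digital_butter_roi"]}',
--         ])
--
--     # Enterprise / Large orgs — Nexford (time savings at scale)
--     if any(kw in industry_lower for kw in ['enterprise', 'financial', 'banking',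
--                                             'insurance', 'healthcare', 'hospital',
--                                             'pharmaceutical', 'automotive']):
--         return '\n'.join([
--             f'- {CASE_STUDIES["nexford_time"]}',
--             f'- {CASE_STUDIES["digital_butter_roi"]}',
--         ])
--
--     # Unknown vertical - provide all three
--     return '\n'.join([
--         f'- {CASE_STUDIES["homefield_ecommerce"]}',
--         f'- {CASE_STUDIES["nexford_time"]}',
--         f'- {CASE_STUDIES["digital_butter_roi"]}',
--     ])
-- ===== SOURCE B (Python) =====
-- CASE_STUDIES = {
--     'adtrak_scaling': (
--         'Adtrak (UK agency, 51-200 employees): switched from Hootsuite, doubled social team '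
--         'from 3 to 7, now managing 100+ profiles for 400+ SME clients. '
--         'Streamlined onboarding for new social media managers.'
--     ),
--     'homefield_ecommerce': (
--         'Homefield Apparel (US e-commerce, 2-10 employees, college sports apparel): '
--         'was tracking social media conversions manually with Excel spreadsheets. '
--         'Switched to Agorapulse for automated social media ROI reporting. '
--         'Replaced manual spreadsheet tracking, now proves ROI of organic social media efforts with data. '
--         'Quote: "Now I have more time to do my creative stuff and think about what\'s next, '
--         'instead of being like, Oh man, I haven\'t done my reporting for the week."'
--     ),
--     'nexford_time': (
--         'Nexford University (US, 51-200 employees, higher education, 8-person social team): '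
--         'switched from Hootsuite after it failed to capture all messages. '
--         'Reduced social media reporting time by 75% with Agorapulse. '
--         'Was using Excel spreadsheets for manual reporting that took hours. '
--         'Quote: "Agorapulse essentially quarters the amount of time that I need to get those reports."'
--     ),
--     'digital_butter_roi': (
--         'Digital Butter (South Africa agency, 2-10 employees): '
--         'switched from Buffer after outgrowing its reporting capabilities. '
--         'Clients increased sales by 300%. Grew one client\'s audience by 700% in one year. '
--         'Cut reporting time in half. Uses label reports to analyze which content types drive more sales. '
--         'Quote: "We don\'t just post for the sake of posting. There needs to be a strategy, '
--         'and we need to be able to show a client a detailed report on how content has done."'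
--     ),
-- }
--
-- # One flat map: keyword substring -> priority rank of the vertical it signals.
-- # Lower rank wins; rank 5 (no keyword found) is the catch-all.
-- KEYWORD_RANK = {
--     'agency': 0, 'marketing & advertising': 0, 'advertising': 0, 'media': 0,
--     'pr ': 0, 'public relations': 0, 'communications': 0,
--     'ecommerce': 1, 'e-commerce': 1, 'retail': 1, 'consumer goods': 1,
--     'food': 1, 'beverage': 1, 'fashion': 1, 'apparel': 1,
--     'education': 2, 'university': 2, 'school': 2, 'higher ed': 2, 'academic': 2,
--     'saas': 3, 'software': 3, 'technology': 3, 'information technology': 3,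
--     'computer': 3, 'internet': 3, 'fintech': 3,
--     'enterprise': 4, 'financial': 4, 'banking': 4, 'insurance': 4,
--     'healthcare': 4, 'hospital': 4, 'pharmaceutical': 4, 'automotive': 4,
-- }
--
-- # Case-study keys to emit for each rank (index 5 = default, unknown vertical).
-- RANK_KEYS = [
--     ['adtrak_scaling', 'digital_butter_roi'],
--     ['homefield_ecommerce', 'digital_butter_roi'],
--     ['nexford_time', 'homefield_ecommerce'],
--     ['nexford_time', 'digital_butter_roi'],
--     ['nexford_time', 'digital_butter_roi'],
--     ['homefield_ecommerce', 'nexford_time', 'digital_butter_roi'],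
-- ]
--
--
-- def select_case_studies(industry):
--     """Select relevant case studies based on company industry"""
--     s = (industry or '').lower()
--     best = len(RANK_KEYS) - 1
--     for kw, rank in KEYWORD_RANK.items():
--         if rank < best and kw in s:
--             best = rank
--     return '\n'.join('- ' + CASE_STUDIES[k] for k in RANK_KEYS[best])
-- ===== Notes on version B (the rewrite author's own statement) =====
-- stated objective: alternative
-- what changed: Instead of A's ordered chain of five any()-branches with early return, B folds over one flat keyword->rank dict keeping the minimum matching rank in an accumulator, then indexes a rank->keys table (rank 5 = default); correct because the first matching branch equals the minimum rank over all matching keywords.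
import Mathlib
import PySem

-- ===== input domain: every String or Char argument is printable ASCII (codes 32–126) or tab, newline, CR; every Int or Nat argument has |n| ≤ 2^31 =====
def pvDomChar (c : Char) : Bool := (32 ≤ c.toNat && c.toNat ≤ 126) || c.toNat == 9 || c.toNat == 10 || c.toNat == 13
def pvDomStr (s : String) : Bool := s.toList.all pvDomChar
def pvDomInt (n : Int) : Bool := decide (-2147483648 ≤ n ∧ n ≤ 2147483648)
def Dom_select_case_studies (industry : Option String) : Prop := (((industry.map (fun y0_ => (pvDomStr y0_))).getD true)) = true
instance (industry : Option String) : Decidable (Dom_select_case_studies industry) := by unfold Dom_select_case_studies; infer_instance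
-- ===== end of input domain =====

-- B replaces A's ordered chain of five any()-branches by a min-rank fold over one flat
-- keyword->rank map, then indexes a rank->keys table; same output on every input.

-- shared module constant CASE_STUDIES (a dict literal), as an association list
def caseStudies : PySem.Dict String String := PySem.Dict.mk [
  ("adtrak_scaling", "Adtrak (UK agency, 51-200 employees): switched from Hootsuite, doubled social team from 3 to 7, now managing 100+ profiles for 400+ SME clients. Streamlined onboarding for new social media managers."),
  ("homefield_ecommerce", "Homefield Apparel (US e-commerce, 2-10 employees, college sports apparel): was tracking social media conversions manually with Excel spreadsheets. Switched to Agorapulse for automated social media ROI reporting. Replaced manual spreadsheet tracking, now proves ROI of organic social media efforts with data. Quote: \"Now I have more time to do my creative stuff and think about what's next, instead of being like, Oh man, I haven't done my reporting for the week.\""),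
  ("nexford_time", "Nexford University (US, 51-200 employees, higher education, 8-person social team): switched from Hootsuite after it failed to capture all messages. Reduced social media reporting time by 75% with Agorapulse. Was using Excel spreadsheets for manual reporting that took hours. Quote: \"Agorapulse essentially quarters the amount of time that I need to get those reports.\""),
  ("digital_butter_roi", "Digital Butter (South Africa agency, 2-10 employees): switched from Buffer after outgrowing its reporting capabilities. Clients increased sales by 300%. Grew one client's audience by 700% in one year. Cut reporting time in half. Uses label reports to analyze which content types drive more sales. Quote: \"We don't just post for the sake of posting. There needs to be a strategy, and we need to be able to show a client a detailed report on how content has done.\"")]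

-- ===== PORT A =====
-- literal transliteration of A: lowercase once, then five any(kw in …) branches in order
def select_case_studies (industry : Option String) : String :=
  let industry_lower := PySem.Str.lower (industry.getD "")  -- (industry or '').lower()
  if (["agency", "marketing & advertising", "advertising", "media", "pr ",
       "public relations", "communications"] : List String).any
      (fun kw => PySem.Str.isIn kw industry_lower) then
    PySem.Str.join "\n"
      ["- " ++ (caseStudies.get? "adtrak_scaling").getD "",
       "- " ++ (caseStudies.get? "digital_butter_roi").getD ""]
  else if (["ecommerce", "e-commerce", "retail", "consumer goods", "food",
            "beverage", "fashion", "apparel"] : List String).any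
      (fun kw => PySem.Str.isIn kw industry_lower) then
    PySem.Str.join "\n"
      ["- " ++ (caseStudies.get? "homefield_ecommerce").getD "",
       "- " ++ (caseStudies.get? "digital_butter_roi").getD ""]
  else if (["education", "university", "school", "higher ed", "academic"] : List String).any
      (fun kw => PySem.Str.isIn kw industry_lower) then
    PySem.Str.join "\n"
      ["- " ++ (caseStudies.get? "nexford_time").getD "",
       "- " ++ (caseStudies.get? "homefield_ecommerce").getD ""]
  else if (["saas", "software", "technology", "information technology", "computer",
            "internet", "fintech"] : List String).any
      (fun kw => PySem.Str.isIn kw industry_lower) then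
    PySem.Str.join "\n"
      ["- " ++ (caseStudies.get? "nexford_time").getD "",
       "- " ++ (caseStudies.get? "digital_butter_roi").getD ""]
  else if (["enterprise", "financial", "banking", "insurance", "healthcare",
            "hospital", "pharmaceutical", "automotive"] : List String).any
      (fun kw => PySem.Str.isIn kw industry_lower) then
    PySem.Str.join "\n"
      ["- " ++ (caseStudies.get? "nexford_time").getD "",
       "- " ++ (caseStudies.get? "digital_butter_roi").getD ""]
  else
    PySem.Str.join "\n"
      ["- " ++ (caseStudies.get? "homefield_ecommerce").getD "",
       "- " ++ (caseStudies.get? "nexford_time").getD "",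
       "- " ++ (caseStudies.get? "digital_butter_roi").getD ""]

-- ===== PORT B =====
-- B's flat keyword -> rank map (KEYWORD_RANK.items(), insertion order)
def keywordRank : List (String × Nat) :=
  [("agency", 0), ("marketing & advertising", 0), ("advertising", 0), ("media", 0),
   ("pr ", 0), ("public relations", 0), ("communications", 0),
   ("ecommerce", 1), ("e-commerce", 1), ("retail", 1), ("consumer goods", 1),
   ("food", 1), ("beverage", 1), ("fashion", 1), ("apparel", 1),
   ("education", 2), ("university", 2), ("school", 2), ("higher ed", 2), ("academic", 2),
   ("saas", 3), ("software", 3), ("technology", 3), ("information technology", 3),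
   ("computer", 3), ("internet", 3), ("fintech", 3),
   ("enterprise", 4), ("financial", 4), ("banking", 4), ("insurance", 4),
   ("healthcare", 4), ("hospital", 4), ("pharmaceutical", 4), ("automotive", 4)]

-- RANK_KEYS: case-study keys per rank; index 5 = default
def rankKeys : List (List String) :=
  [["adtrak_scaling", "digital_butter_roi"],
   ["homefield_ecommerce", "digital_butter_roi"],
   ["nexford_time", "homefield_ecommerce"],
   ["nexford_time", "digital_butter_roi"],
   ["nexford_time", "digital_butter_roi"],
   ["homefield_ecommerce", "nexford_time", "digital_butter_roi"]]

-- '\n'.join('- ' + CASE_STUDIES[k] for k in keys)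
def renderKeys (keys : List String) : String :=
  PySem.Str.join "\n" (keys.map (fun k => "- " ++ (caseStudies.get? k).getD ""))

-- the 'for kw, rank in KEYWORD_RANK.items(): if rank < best and kw in s: best = rank' loop
def minRankStep (s : String) (best : Nat) (p : String × Nat) : Nat :=
  if decide (p.2 < best) && PySem.Str.isIn p.1 s then p.2 else best

def select_case_studies_alt (industry : Option String) : String :=
  let s := PySem.Str.lower (industry.getD "")
  let best := keywordRank.foldl (minRankStep s) (rankKeys.length - 1)
  renderKeys (rankKeys.getD best [])

-- ===== PRECONDITION & SPEC =====
def Spec_select_case_studies (industry : Option String) (out : String) : Prop := out = select_case_studies_alt industry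
instance (industry : Option String) (out : String) : Decidable (Spec_select_case_studies industry out) := by unfold Spec_select_case_studies; infer_instance

-- ===== CLAIM (what is proved, stated in full; the proofs are below) =====
def Claim_equal_select_case_studies : Prop := ∀ (industry : Option String), Dom_select_case_studies industry → Spec_select_case_studies industry (select_case_studies industry)

-- ===== LEMMAS AND PROOFS =====

-- folding the min-rank step over one keyword group (all keywords carrying the same rank i)
-- updates the accumulator to i exactly when some keyword matches and i improves on it
theorem foldl_minRankStep_group (s : String) (i : Nat) (kws : List String) (acc : Nat) :
    (kws.map (fun kw => (kw, i))).foldl (minRankStep s) acc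
      = if kws.any (fun kw => PySem.Str.isIn kw s) && decide (i < acc) then i else acc := by
  induction kws generalizing acc with
  | nil => simp
  | cons kw rest ih =>
    simp only [List.map_cons, List.foldl_cons, List.any_cons, minRankStep]
    rw [ih]
    simp only [Bool.and_eq_true, Bool.or_eq_true, decide_eq_true_eq]
    by_cases hm : PySem.Str.isIn kw s = true <;> by_cases hlt : i < acc <;>
      simp only [hm, hlt] <;> split_ifs <;>
        first | rfl | omega | (simp_all; done) | tauto

-- ===== VERDICT (by name: the statement is the Claim_ definition above) =====
theorem select_case_studies_spec : Claim_equal_select_case_studies := by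
  intro industry _
  unfold Spec_select_case_studies select_case_studies select_case_studies_alt
  have hk : keywordRank
      = (["agency", "marketing & advertising", "advertising", "media", "pr ",
          "public relations", "communications"].map (fun kw => (kw, 0)))
        ++ (["ecommerce", "e-commerce", "retail", "consumer goods", "food",
             "beverage", "fashion", "apparel"].map (fun kw => (kw, 1)))
        ++ (["education", "university", "school", "higher ed", "academic"].map (fun kw => (kw, 2)))
        ++ (["saas", "software", "technology", "information technology", "computer",
             "internet", "fintech"].map (fun kw => (kw, 3)))
        ++ (["enterprise", "financial", "banking", "insurance", "healthcare",
             "hospital", "pharmaceutical", "automotive"].map (fun kw => (kw, 4))) := rfl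
  simp only [hk, List.foldl_append, foldl_minRankStep_group]
  generalize (["agency", "marketing & advertising", "advertising", "media", "pr ",
       "public relations", "communications"] : List String).any
      (fun kw => PySem.Str.isIn kw (PySem.Str.lower (industry.getD ""))) = c0
  generalize (["ecommerce", "e-commerce", "retail", "consumer goods", "food",
       "beverage", "fashion", "apparel"] : List String).any
      (fun kw => PySem.Str.isIn kw (PySem.Str.lower (industry.getD ""))) = c1
  generalize (["education", "university", "school", "higher ed", "academic"] : List String).any
      (fun kw => PySem.Str.isIn kw (PySem.Str.lower (industry.getD ""))) = c2
  generalize (["saas", "software", "technology", "information technology", "computer",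
       "internet", "fintech"] : List String).any
      (fun kw => PySem.Str.isIn kw (PySem.Str.lower (industry.getD ""))) = c3
  generalize (["enterprise", "financial", "banking", "insurance", "healthcare",
       "hospital", "pharmaceutical", "automotive"] : List String).any
      (fun kw => PySem.Str.isIn kw (PySem.Str.lower (industry.getD ""))) = c4
  cases c0 <;> cases c1 <;> cases c2 <;> cases c3 <;> cases c4 <;> rfl
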